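-- pv_equiv track=rewrite | github.com/jjjilot/CS210 | CS 210 Projects/06-Boggle-main/boggler.py | search
-- ===== SOURCE A (Python) =====
-- NOPE = "Nope"       # Not a match, nor a prefix of a match
--
-- MATCH = "Match"     # Exact match to a valid word
--
-- PREFIX = "Prefix"   # Not an exact match, but a prefix (keep searching!)
--
-- def search(candidate: str, word_list: list[str]) -> str:
--     """
--     Determine whether candidate is a MATCH, a PREFIX of a match, or a big NOPE
--     Note word list MUST be in sorted order.
--
--     >>> search("ALPHA", ['ALPHA', 'BETA', 'GAMMA']) == MATCH
--     True
--
--     >>> search("BE", ['ALPHA', 'BETA', 'GAMMA']) == PREFIX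
--     True
--
--     >>> search("FOX", ['ALPHA', 'BETA', 'GAMMA']) == NOPE
--     True
--
--     >>> search("ZZZZ", ['ALPHA', 'BETA', 'GAMMA']) == NOPE
--     True
--     """
--     low = 0
--     high = len(word_list) - 1
--
--     while low <= high:
--         mid = (high + low) // 2
--
--         if candidate == word_list[mid]:
--             return MATCH
--
--         cand_compare = candidate, word_list[mid]
--         if sorted(cand_compare)[0] == candidate:
--             high = mid - 1
--         else:
--             low = mid + 1
--
--     if low < len(word_list) and word_list[low].startswith(candidate):
--         return PREFIX
--
--     return NOPE
-- ===== SOURCE B (Python) =====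
-- NOPE = "Nope"
-- MATCH = "Match"
-- PREFIX = "Prefix"
--
-- def search(candidate: str, word_list: list[str]) -> str:
--     """Single linear scan: exact match wins immediately; otherwise remember
--     whether any word had candidate as a prefix."""
--     found_prefix = False
--     for word in word_list:
--         if word == candidate:
--             return MATCH
--         if word.startswith(candidate):
--             found_prefix = True
--     return PREFIX if found_prefix else NOPE
-- ===== Notes on version B (the rewrite author's own statement) =====
-- stated objective: simpler
-- what changed: Replaced the hand-rolled binary search (with its sorted-pair comparison trick and post-loop probe) by a single linear scan that returns MATCH on an equal word and remembers a prefix flag.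
-- outside the precondition, e.g. on search('BETA', ['GAMMA', 'BETA']): A returns 'Nope', B returns 'Match'
import Mathlib
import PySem

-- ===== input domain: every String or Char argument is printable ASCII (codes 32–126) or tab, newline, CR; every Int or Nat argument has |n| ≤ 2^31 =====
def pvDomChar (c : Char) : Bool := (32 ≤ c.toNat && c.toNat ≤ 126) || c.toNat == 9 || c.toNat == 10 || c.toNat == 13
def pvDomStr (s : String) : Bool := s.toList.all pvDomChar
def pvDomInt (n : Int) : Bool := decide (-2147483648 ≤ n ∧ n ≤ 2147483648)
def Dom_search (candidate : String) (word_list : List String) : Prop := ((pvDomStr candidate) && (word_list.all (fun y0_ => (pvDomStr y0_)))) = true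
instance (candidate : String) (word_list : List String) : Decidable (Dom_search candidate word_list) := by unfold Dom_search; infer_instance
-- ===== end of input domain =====

-- B replaces A's hand-rolled binary search by a single linear scan (simpler, no sortedness needed); return values only, no mutation.

-- ===== PORT A =====
-- the while-loop of A: state (low, high), literal transliteration
def searchLoop (candidate : String) (word_list : List String) (low high : Int) : String :=
  if h : low ≤ high then
    -- mid = (high + low) // 2
    match PySem.List.pyGet? word_list (PySem.Int.floordiv (high + low) 2) with
    | none => "Nope"  -- unreachable: 0 ≤ low ≤ mid ≤ high < len(word_list) in every reachable state (Python would raise IndexError)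
    | some w =>
      if candidate == w then "Match"
      else if (PySem.List.sorted [candidate, w] (fun x => x) false).headD "" == candidate then
        searchLoop candidate word_list low (PySem.Int.floordiv (high + low) 2 - 1)
      else
        searchLoop candidate word_list (PySem.Int.floordiv (high + low) 2 + 1) high
  else
    -- post-loop: if low < len(word_list) and word_list[low].startswith(candidate)
    if low < (word_list.length : Int) then
      match PySem.List.pyGet? word_list low with
      | some w => if PySem.Str.startswith w candidate then "Prefix" else "Nope"
      | none => "Nope"  -- unreachable: 0 ≤ low < len(word_list) here
    else "Nope"
termination_by (high + 1 - low).toNat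
decreasing_by
  · have hb := PySem.Int.floordiv_two_mid_bounds h
    rw [Int.add_comm low high] at hb
    omega
  · have hb := PySem.Int.floordiv_two_mid_bounds h
    rw [Int.add_comm low high] at hb
    omega

def search (candidate : String) (word_list : List String) : String :=
  searchLoop candidate word_list 0 ((word_list.length : Int) - 1)

-- ===== PORT B =====
-- the for-loop of B: carries the found_prefix flag
def searchAltGo (candidate : String) (word_list : List String) (found_prefix : Bool) : String :=
  match word_list with
  | [] => if found_prefix then "Prefix" else "Nope"
  | w :: rest =>
    if w == candidate then "Match"
    else searchAltGo candidate rest (found_prefix || PySem.Str.startswith w candidate)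

def search_alt (candidate : String) (word_list : List String) : String :=
  searchAltGo candidate word_list false

-- ===== PRECONDITION & SPEC =====
-- Pre_ excludes only UNSORTED lists in which some word has the candidate as a prefix: the docstring demands a
-- sorted list ("Note word list MUST be in sorted order.") and on such unsorted lists A's bisection returns an
-- accidental value (it can miss words that are present); every sorted list, and every list with no word
-- extending the candidate (where both sides necessarily answer "Nope"/"Match"-free), is admitted.
def Pre_search (candidate : String) (word_list : List String) : Prop :=
  word_list.Pairwise (fun a b => a.toList ≤ b.toList) ∨
    (∀ w ∈ word_list, PySem.Str.startswith w candidate = false)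
instance (candidate : String) (word_list : List String) : Decidable (Pre_search candidate word_list) := by unfold Pre_search; infer_instance

def pvWitness_search : String × List String := ("BE", ["ALPHA", "BETA", "GAMMA"])

def Spec_search (candidate : String) (word_list : List String) (out : String) : Prop := out = search_alt candidate word_list
instance (candidate : String) (word_list : List String) (out : String) : Decidable (Spec_search candidate word_list out) := by unfold Spec_search; infer_instance

-- ===== CLAIM (what is proved, stated in full; the proofs are below) =====
def Claim_equal_search : Prop := ∀ (candidate : String) (word_list : List String), Dom_search candidate word_list → Pre_search candidate word_list → Spec_search candidate word_list (search candidate word_list)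

-- ===== LEMMAS AND PROOFS =====

-- the common characterisation both ports are reduced to
def pvSpec3 (c : String) (wl : List String) : String :=
  if c ∈ wl then "Match"
  else if wl.any (fun w => PySem.Str.startswith w c) then "Prefix"
  else "Nope"

-- a proper extension is lexicographically strictly greater
lemma pv_lex_append (c t : List Char) (h : t ≠ []) : List.Lex (· < ·) c (c ++ t) := by
  induction c with
  | nil => cases t with
    | nil => exact absurd rfl h
    | cons a t' => exact List.Lex.nil
  | cons a c' ih => exact List.Lex.cons ih

-- a prefix is lexicographically ≤
lemma pv_prefix_le {c s : String} (h : c.toList <+: s.toList) : c ≤ s := by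
  rcases h with ⟨t, ht⟩
  rcases eq_or_ne t [] with rfl | hne
  · have : c = s := by
      apply String.ext
      simpa using ht
    exact le_of_eq this
  · apply le_of_lt
    rw [String.lt_iff_toList_lt, ← ht]
    exact pv_lex_append c.toList t hne

-- anything lexicographically between a word and one of its prefix-extensions shares the prefix
lemma pv_between_lt : ∀ (c s w : List Char), List.Lex (· < ·) c s → List.Lex (· < ·) s w → c <+: w → c <+: s := by
  intro c
  induction c with
  | nil => intro s w _ _ _; exact List.nil_prefix
  | cons a c' ih =>
    intro s w h1 h2 hp
    cases s with
    | nil => cases h1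
    | cons b s' =>
      cases w with
      | nil => cases h2
      | cons d w' =>
        obtain ⟨rfl, hpw⟩ : a = d ∧ c' <+: w' := by
          rcases List.cons_prefix_cons.mp hp with ⟨h, h'⟩; exact ⟨h, h'⟩
        cases h1 with
        | rel hab =>
          cases h2 with
          | rel hba => exact absurd (lt_trans hab hba) (lt_irrefl a)
          | cons h2' => exact absurd hab (lt_irrefl a)
        | cons h1' =>
          cases h2 with
          | rel hba => exact absurd hba (lt_irrefl a)
          | cons h2' => exact List.cons_prefix_cons.mpr ⟨rfl, ih s' w' h1' h2' hpw⟩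

-- string version, with ≤ on both sides
lemma pv_between_prefix {c s w : String} (h1 : c ≤ s) (h2 : s ≤ w)
    (hp : PySem.Str.startswith w c = true) : PySem.Str.startswith s c = true := by
  rw [PySem.Str.startswith_eq, PySem.Chars.startswith_iff] at hp ⊢
  rcases eq_or_lt_of_le h1 with rfl | h1'
  · exact List.prefix_refl _
  · rcases eq_or_lt_of_le h2 with rfl | h2'
    · exact hp
    · rw [String.lt_iff_toList_lt] at h1' h2'
      exact pv_between_lt c.toList s.toList w.toList h1' h2' hp

-- Python's sorted([a, b]) evaluated
lemma pv_sorted_pair (a b : String) :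
    (PySem.List.sorted [a, b] (fun x => x) false) = if b < a then [b, a] else [a, b] := by
  by_cases h : b < a <;>
    simp only [PySem.List.sorted_eq_foldl_insertBy, List.foldl, PySem.List.insertBy, h,
      decide_true, decide_false, if_true, if_false] <;> simp [PySem.List.insertBy, h]

-- B's loop returns Match on membership, else Prefix iff the flag or some word extends the candidate
lemma pv_altGo_eq (c : String) : ∀ (wl : List String) (found : Bool),
    searchAltGo c wl found =
      if c ∈ wl then "Match"
      else if (found || wl.any (fun w => PySem.Str.startswith w c)) then "Prefix" else "Nope" := by
  intro wl
  induction wl with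
  | nil => intro found; simp [searchAltGo]
  | cons w rest ih =>
    intro found
    by_cases hw : w == c
    · have : c ∈ w :: rest := by
        have : w = c := by simpa using hw
        simp [this]
      simp [searchAltGo, hw, this]
    · have hwc : w ≠ c := by simpa using hw
      have hcw : ¬ c = w := fun h => hwc h.symm
      simp only [searchAltGo, hw, if_false, ih, List.mem_cons, List.any_cons]
      by_cases hm : c ∈ rest
      · simp [hm]
      · simp [hm, hcw, Bool.or_assoc, Bool.or_comm (PySem.Str.startswith w c)]

lemma pv_alt_eq_spec3 (c : String) (wl : List String) : search_alt c wl = pvSpec3 c wl := by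
  rw [search_alt, pv_altGo_eq, pvSpec3]
  simp

-- A's loop, under the sortedness invariant
lemma pv_loop_eq (c : String) (wl : List String) (hs : wl.Pairwise (· ≤ ·)) :
    ∀ (n : Nat) (low high : Int), (high + 1 - low).toNat = n → 0 ≤ low → high < (wl.length : Int) →
    (∀ (i : Nat) (hi : i < wl.length), (i : Int) < low → wl[i] < c) →
    (∀ (i : Nat) (hi : i < wl.length), high < (i : Int) → c < wl[i]) →
    searchLoop c wl low high = pvSpec3 c wl := by
  have hmono : ∀ (i j : Nat) (hi : i < wl.length) (hj : j < wl.length), i ≤ j → wl[i] ≤ wl[j] := by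
    intro i j hi hj hij
    rcases eq_or_lt_of_le hij with rfl | hij'
    · exact le_refl _
    · exact List.pairwise_iff_getElem.mp hs i j hi hj hij'
  intro n
  induction n using Nat.strong_induction_on with
  | _ n ih =>
    intro low high hn hlow0 hhigh hlt hgt
    rw [searchLoop]
    by_cases h : low ≤ high
    · -- the loop body runs once
      have hb := PySem.Int.floordiv_two_mid_bounds h
      rw [Int.add_comm low high] at hb
      set mid := PySem.Int.floordiv (high + low) 2 with hmiddef
      have hmlen : mid.toNat < wl.length := by omega
      have hget : PySem.List.pyGet? wl mid = some wl[mid.toNat] := by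
        have hcast : mid = ((mid.toNat : Nat) : Int) := by omega
        have h1 : PySem.List.pyGet? wl ((mid.toNat : Nat) : Int) = some wl[mid.toNat] := by
          rw [PySem.List.pyGet?_natCast, List.getElem?_eq_getElem hmlen]
        conv_lhs => rw [hcast]
        exact h1
      simp only [dif_pos h, hget]
      by_cases hc : (c == wl[mid.toNat]) = true
      · have hceq : c = wl[mid.toNat] := by simpa using hc
        have hmem : c ∈ wl := hceq ▸ List.getElem_mem hmlen
        simp [hc, pvSpec3, hmem]
      · have hne : c ≠ wl[mid.toNat] := by simpa using hc
        rw [pv_sorted_pair]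
        by_cases hwc : wl[mid.toNat] < c
        · have hbeqf : (wl[mid.toNat] == c) = false := beq_eq_false_iff_ne.mpr (Ne.symm hne)
          simp only [hc, Bool.false_eq_true, if_false, if_pos hwc, List.headD_cons, hbeqf]
          apply ih (high + 1 - (mid + 1)).toNat (by omega) (mid + 1) high (by omega) (by omega) hhigh
          · intro i hi hilt
            have hile : i ≤ mid.toNat := by omega
            calc wl[i] ≤ wl[mid.toNat] := hmono i mid.toNat hi hmlen hile
              _ < c := hwc
          · exact hgt
        · have hcw : c < wl[mid.toNat] := lt_of_le_of_ne (le_of_not_gt hwc) hne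
          simp only [hc, Bool.false_eq_true, if_false, if_neg hwc, List.headD_cons, beq_self_eq_true,
            if_true]
          apply ih (mid - 1 + 1 - low).toNat (by omega) low (mid - 1) (by omega) hlow0 (by omega) hlt
          · intro i hi higt
            have hile : mid.toNat ≤ i := by omega
            calc c < wl[mid.toNat] := hcw
              _ ≤ wl[i] := hmono mid.toNat i hmlen hi hile
    · -- the loop has terminated: low = insertion point
      have hnm : c ∉ wl := by
        intro hmem
        obtain ⟨i, hi, hieq⟩ := List.mem_iff_getElem.mp hmem
        rcases lt_or_ge (i : Int) low with hi1 | hi2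
        · have := hlt i hi hi1; rw [hieq] at this; exact lt_irrefl c this
        · have := hgt i hi (by omega); rw [hieq] at this; exact lt_irrefl c this
      by_cases hlen : low < (wl.length : Int)
      · have hlo : low.toNat < wl.length := by omega
        have hget : PySem.List.pyGet? wl low = some wl[low.toNat] := by
          have hcast : low = ((low.toNat : Nat) : Int) := by omega
          have h1 : PySem.List.pyGet? wl ((low.toNat : Nat) : Int) = some wl[low.toNat] := by
            rw [PySem.List.pyGet?_natCast, List.getElem?_eq_getElem hlo]
          conv_lhs => rw [hcast]
          exact h1
        simp only [dif_neg h, if_pos hlen, hget]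
        by_cases hsw : PySem.Str.startswith wl[low.toNat] c = true
        · have hany : wl.any (fun w => PySem.Str.startswith w c) = true :=
            List.any_eq_true.mpr ⟨wl[low.toNat], List.getElem_mem hlo, hsw⟩
          simp only [pvSpec3, hsw, hany]
          simp [hnm]
        · have hswf : PySem.Str.startswith wl[low.toNat] c = false := by
            simpa using hsw
          have hany : wl.any (fun w => PySem.Str.startswith w c) = false := by
            rw [List.any_eq_false]
            intro x hx
            by_contra hpx'
            have hpx : PySem.Str.startswith x c = true := by simpa using hpx'
            obtain ⟨i, hi, hieq⟩ := List.mem_iff_getElem.mp hx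
            rw [← hieq] at hpx
            have hcx : c ≤ wl[i] :=
              pv_prefix_le ((PySem.Chars.startswith_iff _ _).mp
                (by rwa [PySem.Str.startswith_eq] at hpx))
            rcases lt_or_ge (i : Int) low with hi1 | hi2
            · exact absurd hcx (not_le.mpr (hlt i hi hi1))
            · have hclw : c < wl[low.toNat] := hgt low.toNat hlo (by omega)
              have hle : wl[low.toNat] ≤ wl[i] := hmono low.toNat i hlo hi (by omega)
              exact hsw (pv_between_prefix (le_of_lt hclw) hle hpx)
          simp only [pvSpec3, hswf, hany]
          simp [hnm]
      · have hany : wl.any (fun w => PySem.Str.startswith w c) = false := by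
          rw [List.any_eq_false]
          intro x hx
          by_contra hpx'
          have hpx : PySem.Str.startswith x c = true := by simpa using hpx'
          obtain ⟨i, hi, hieq⟩ := List.mem_iff_getElem.mp hx
          rw [← hieq] at hpx
          have hcx : c ≤ wl[i] :=
            pv_prefix_le ((PySem.Chars.startswith_iff _ _).mp
              (by rwa [PySem.Str.startswith_eq] at hpx))
          have hi1 : (i : Int) < low := by
            have : (i : Int) < (wl.length : Int) := by exact_mod_cast hi
            omega
          exact absurd hcx (not_le.mpr (hlt i hi hi1))
        simp only [dif_neg h, if_neg hlen, pvSpec3, hany]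
        simp [hnm]

lemma pv_startswith_refl (s : String) : PySem.Str.startswith s s = true := by
  rw [PySem.Str.startswith_eq]
  exact (PySem.Chars.startswith_iff _ _).mpr (List.prefix_refl _)

-- when no word extends the candidate, A's loop can only answer "Nope"
lemma pv_loop_nope (c : String) (wl : List String)
    (hnp : ∀ w ∈ wl, PySem.Str.startswith w c = false) :
    ∀ (n : Nat) (low high : Int), (high + 1 - low).toNat = n → 0 ≤ low → high < (wl.length : Int) →
    searchLoop c wl low high = "Nope" := by
  intro n
  induction n using Nat.strong_induction_on with
  | _ n ih =>
    intro low high hn hlow0 hhigh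
    rw [searchLoop]
    by_cases h : low ≤ high
    · have hb := PySem.Int.floordiv_two_mid_bounds h
      rw [Int.add_comm low high] at hb
      set mid := PySem.Int.floordiv (high + low) 2 with hmiddef
      have hmlen : mid.toNat < wl.length := by omega
      have hget : PySem.List.pyGet? wl mid = some wl[mid.toNat] := by
        have hcast : mid = ((mid.toNat : Nat) : Int) := by omega
        have h1 : PySem.List.pyGet? wl ((mid.toNat : Nat) : Int) = some wl[mid.toNat] := by
          rw [PySem.List.pyGet?_natCast, List.getElem?_eq_getElem hmlen]
        conv_lhs => rw [hcast]
        exact h1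
      simp only [dif_pos h, hget]
      have hne : (c == wl[mid.toNat]) = false := by
        apply beq_eq_false_iff_ne.mpr
        intro hceq
        have := hnp wl[mid.toNat] (List.getElem_mem hmlen)
        rw [← hceq, pv_startswith_refl] at this
        exact Bool.true_eq_false.mp this
      simp only [hne, Bool.false_eq_true, if_false]
      by_cases hwc : (PySem.List.sorted [c, wl[mid.toNat]] (fun x => x) false).headD "" == c
      · simp only [hwc, if_true]
        exact ih (mid - 1 + 1 - low).toNat (by omega) low (mid - 1) (by omega) hlow0 (by omega)
      · simp only [hwc, Bool.false_eq_true, if_false]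
        exact ih (high + 1 - (mid + 1)).toNat (by omega) (mid + 1) high (by omega) (by omega) hhigh
    · by_cases hlen : low < (wl.length : Int)
      · have hlo : low.toNat < wl.length := by omega
        have hget : PySem.List.pyGet? wl low = some wl[low.toNat] := by
          have hcast : low = ((low.toNat : Nat) : Int) := by omega
          have h1 : PySem.List.pyGet? wl ((low.toNat : Nat) : Int) = some wl[low.toNat] := by
            rw [PySem.List.pyGet?_natCast, List.getElem?_eq_getElem hlo]
          conv_lhs => rw [hcast]
          exact h1
        have hsw := hnp wl[low.toNat] (List.getElem_mem hlo)
        rw [PySem.Str.startswith_eq] at hsw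
        simp [dif_neg h, if_pos hlen, hget, hsw]
      · simp [dif_neg h, if_neg hlen]

-- and B's characterisation is also "Nope" there
lemma pv_spec3_nope (c : String) (wl : List String)
    (hnp : ∀ w ∈ wl, PySem.Str.startswith w c = false) : pvSpec3 c wl = "Nope" := by
  have hnm : c ∉ wl := by
    intro hmem
    have := hnp c hmem
    rw [pv_startswith_refl] at this
    exact Bool.true_eq_false.mp this
  have hall : ∀ x ∈ wl, PySem.Chars.startswith x.toList c.toList = false := by
    intro x hx
    have h1 := hnp x hx
    rw [PySem.Str.startswith_eq] at h1
    exact h1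
  simp [pvSpec3, hnm]
  exact hall

lemma pv_a_eq_spec3 (c : String) (wl : List String) (hs : wl.Pairwise (· ≤ ·)) :
    search c wl = pvSpec3 c wl := by
  apply pv_loop_eq c wl hs ((wl.length : Int) - 1 + 1 - 0).toNat 0 ((wl.length : Int) - 1) rfl le_rfl
  · omega
  · intro i hi hilt
    exfalso
    omega
  · intro i hi higt
    exfalso
    have : (i : Int) < (wl.length : Int) := by exact_mod_cast hi
    omega

-- ===== VERDICT (by name: the statement is the Claim_ definition above) =====
theorem search_spec : Claim_equal_search := by
  intro c wl _ hpre
  unfold Spec_search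
  rw [pv_alt_eq_spec3]
  rcases hpre with hpre | hnp
  · have hs : wl.Pairwise (· ≤ ·) := hpre.imp (fun hab => String.le_iff_toList_le.mpr hab)
    exact pv_a_eq_spec3 c wl hs
  · rw [pv_spec3_nope c wl hnp]
    apply pv_loop_nope c wl hnp ((wl.length : Int) - 1 + 1 - 0).toNat 0 ((wl.length : Int) - 1) rfl le_rfl
    omega
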